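-- pv_equiv track=rewrite | github.com/dbspgnl/CodingTest_Python | 연습/2309/0912_1.py | solution
-- ===== SOURCE A (Python) =====
-- from collections import deque
--
-- def solution(progresses, speeds):
--     answer = []
--     queue = deque()
--     for i in range(len(progresses)):
--         today = 100 - progresses[i] + speeds[i] -1
--         workng_day = today//speeds[i]
--         queue.append(workng_day)
--     while queue:
--         cnt = 1
--         first = queue.popleft()
--         while queue and queue[0] <= first:
--             cnt +=1
--             queue.popleft()
--         answer.append(cnt)
--
--     return answer
-- ===== SOURCE B (Python) =====
-- from collections import Counter
--
-- def solution(progresses, speeds):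
--     days = [(100 - p + s - 1) // s for p, s in zip(progresses, speeds)]
--     release = []
--     top = None
--     for d in days:
--         if top is None or d > top:
--             top = d
--         release.append(top)
--     counts = Counter(release)
--     return [counts[m] for m in dict.fromkeys(release)]
-- ===== Notes on version B (the rewrite author's own statement) =====
-- stated objective: alternative
-- what changed: Replaced the deque with its nested popleft/peek counting loop by computing each task's release day (running max of finish days) and answering with a Counter: one multiplicity lookup per distinct release day, in first-occurrence order.
import Mathlib
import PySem

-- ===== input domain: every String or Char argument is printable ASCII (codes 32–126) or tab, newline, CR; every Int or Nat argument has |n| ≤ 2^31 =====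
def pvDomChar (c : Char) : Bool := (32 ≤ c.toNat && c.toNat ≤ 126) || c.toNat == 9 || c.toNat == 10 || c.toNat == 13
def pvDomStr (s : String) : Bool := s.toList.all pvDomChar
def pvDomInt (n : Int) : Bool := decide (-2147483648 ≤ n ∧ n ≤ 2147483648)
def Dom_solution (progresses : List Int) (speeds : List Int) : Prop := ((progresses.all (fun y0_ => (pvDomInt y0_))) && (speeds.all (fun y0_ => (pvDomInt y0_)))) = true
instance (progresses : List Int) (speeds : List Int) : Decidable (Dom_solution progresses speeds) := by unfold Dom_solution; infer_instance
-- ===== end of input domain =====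

-- B replaces A's deque with nested popleft/peek loops by computing each task's release day
-- (running maximum of finish days) and returning, per distinct release day in order, its
-- multiplicity from a Counter (simpler decomposition via counting; same O-cost up to the dict).


-- ===== PORT A =====
-- inner 'while queue and queue[0] <= first' loop: pops while the front is ≤ first, counting
def solPop (first : Int) : List Int → Int → Int × List Int
  | [], cnt => (cnt, [])
  | q :: qs, cnt => if q ≤ first then solPop first qs (cnt + 1) else (cnt, q :: qs)

-- cited by solGroup's decreasing_by
theorem solPop_length_le (first : Int) : ∀ (l : List Int) (cnt : Int), (solPop first l cnt).2.length ≤ l.length := by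
  intro l
  induction l with
  | nil => intro cnt; simp [solPop]
  | cons q qs ih =>
    intro cnt
    by_cases h : q ≤ first
    · simpa [solPop, h] using (ih (cnt + 1)).trans (Nat.le_succ _)
    · simp [solPop, h]

-- outer 'while queue' loop
def solGroup : List Int → List Int
  | [] => []
  | first :: rest =>
    let r := solPop first rest 1
    r.1 :: solGroup r.2
  termination_by l => l.length
  decreasing_by
    simpa [Nat.lt_succ_iff] using solPop_length_le first rest 1

def solution (progresses : List Int) (speeds : List Int) : List Int :=
  let queue := (PySem.List.pyRange 0 (progresses.length : Int) 1).foldl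
    (fun q i =>
      let today := 100 - PySem.List.pyGetD progresses i 0 + PySem.List.pyGetD speeds i 0 - 1
      let workng_day := PySem.Int.floordiv today (PySem.List.pyGetD speeds i 0)
      q ++ [workng_day]) []
  solGroup queue

-- ===== PORT B =====
-- B's release-day loop body: top is None-or-max-so-far, appended each step
def solStepB (st : List Int × Option Int) (d : Int) : List Int × Option Int :=
  let top := match st.2 with | none => d | some t => if d > t then d else t
  (st.1 ++ [top], some top)

def solution_alt (progresses : List Int) (speeds : List Int) : List Int :=
  let days := (progresses.zip speeds).map (fun ps => PySem.Int.floordiv (100 - ps.1 + ps.2 - 1) ps.2)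
  let release := (days.foldl solStepB ([], none)).1
  (PySem.List.dedup release).map (fun m => (PySem.Dict.counter release).getD m 0)

-- ===== PRECONDITION & SPEC =====
-- Pre_ excludes exactly the inputs where Python A raises: an index beyond speeds (IndexError)
-- or a zero speed among the used entries (ZeroDivisionError).
def Pre_solution (progresses : List Int) (speeds : List Int) : Prop :=
  progresses.length ≤ speeds.length ∧ ∀ s ∈ speeds.take progresses.length, s ≠ 0
instance (progresses : List Int) (speeds : List Int) : Decidable (Pre_solution progresses speeds) := by unfold Pre_solution; infer_instance

def pvWitness_solution : List Int × List Int := ([93, 30, 55], [1, 30, 5])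

def Spec_solution (progresses : List Int) (speeds : List Int) (out : List Int) : Prop := out = solution_alt progresses speeds
instance (progresses : List Int) (speeds : List Int) (out : List Int) : Decidable (Spec_solution progresses speeds out) := by unfold Spec_solution; infer_instance

-- ===== CLAIM (what is proved, stated in full; the proofs are below) =====
def Claim_equal_solution : Prop := ∀ (progresses : List Int) (speeds : List Int), Dom_solution progresses speeds → Pre_solution progresses speeds → Spec_solution progresses speeds (solution progresses speeds)

-- ===== LEMMAS AND PROOFS =====

@[simp] theorem solGroup_nil : solGroup [] = [] := by rw [solGroup]

theorem solGroup_cons (f : Int) (r : List Int) :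
    solGroup (f :: r) = (solPop f r 1).1 :: solGroup (solPop f r 1).2 := by rw [solGroup]

-- A's queue (index loop over range(len(progresses))) equals B's days (zip + map)
theorem queue_eq_days (progresses speeds : List Int)
    (h : progresses.length ≤ speeds.length) :
    (PySem.List.pyRange 0 (progresses.length : Int) 1).foldl
      (fun q i => q ++ [PySem.Int.floordiv
          (100 - PySem.List.pyGetD progresses i 0 + PySem.List.pyGetD speeds i 0 - 1)
          (PySem.List.pyGetD speeds i 0)]) []
    = (progresses.zip speeds).map (fun ps => PySem.Int.floordiv (100 - ps.1 + ps.2 - 1) ps.2) := by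
  rw [PySem.List.foldl_append_singleton_eq_map, PySem.List.pyRange_zero_nat, List.map_map]
  apply List.ext_getElem
  · simp [Nat.min_eq_left h]
  · intro i h1 h2
    have hip : i < progresses.length := by simpa using h1
    have his : i < speeds.length := lt_of_lt_of_le hip h
    simp [PySem.List.pyGetD_natCast, List.getD_eq_getElem?_getD, hip, his]

-- release days with current maximum m (B's loop after the first element)
def scanMax (m : Int) : List Int → List Int
  | [] => []
  | d :: ds => (if d > m then d else m) :: scanMax (if d > m then d else m) ds

-- release days of a whole queue
def relDays : List Int → List Int
  | [] => []
  | d :: ds => d :: scanMax d ds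

theorem foldB_scan (ds : List Int) : ∀ (acc : List Int) (m : Int),
    (ds.foldl solStepB (acc, some m)).1 = acc ++ scanMax m ds := by
  induction ds with
  | nil => intro acc m; simp [scanMax]
  | cons d ds ih =>
    intro acc m
    simp only [List.foldl_cons, solStepB, scanMax]
    by_cases h : d > m
    · simp [h, ih]
    · simp [h, ih]

theorem foldB_rel (ds : List Int) : (ds.foldl solStepB ([], none)).1 = relDays ds := by
  cases ds with
  | nil => simp [relDays]
  | cons d ds =>
    simp only [List.foldl_cons, solStepB, relDays]
    simpa using foldB_scan ds [d] d

theorem scanMax_ge (ds : List Int) : ∀ (m : Int) (x : Int), x ∈ scanMax m ds → m ≤ x := by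
  induction ds with
  | nil => intro m x hx; simp [scanMax] at hx
  | cons d ds ih =>
    intro m x hx
    simp only [scanMax, List.mem_cons] at hx
    rcases hx with h | h
    · subst h; split <;> omega
    · have := ih _ x h; split at this <;> omega

theorem solPop_add (m : Int) (ds : List Int) : ∀ (c : Int),
    solPop m ds c = (c + (solPop m ds 0).1, (solPop m ds 0).2) := by
  induction ds with
  | nil => intro c; simp [solPop]
  | cons d ds ih =>
    intro c
    by_cases h : d ≤ m
    · simp only [solPop, if_pos h, zero_add]
      rw [ih (c + 1), ih 1]
      exact Prod.ext (by omega) rfl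
    · simp [solPop, h]

theorem solPop_nonneg (m : Int) (ds : List Int) : 0 ≤ (solPop m ds 0).1 := by
  induction ds with
  | nil => simp [solPop]
  | cons d ds ih =>
    by_cases h : d ≤ m
    · simp only [solPop, if_pos h, zero_add, solPop_add m ds 1]; omega
    · simp [solPop, h]

theorem solPop_rest_head (m : Int) (ds : List Int) :
    (solPop m ds 0).2 = [] ∨ ∃ d' r, (solPop m ds 0).2 = d' :: r ∧ m < d' := by
  induction ds with
  | nil => left; simp [solPop]
  | cons d ds ih =>
    by_cases h : d ≤ m
    · simpa [solPop, h, zero_add, solPop_add m ds 1] using ih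
    · right; exact ⟨d, ds, by simp [solPop, h], by omega⟩

theorem scan_split (ds : List Int) : ∀ (m : Int),
    scanMax m ds = List.replicate ((solPop m ds 0).1.toNat) m ++ relDays (solPop m ds 0).2 := by
  induction ds with
  | nil => intro m; simp [scanMax, solPop, relDays]
  | cons d ds ih =>
    intro m
    by_cases h : d ≤ m
    · have hnot : ¬ d > m := by omega
      have hp := solPop_nonneg m ds
      simp only [scanMax, if_neg hnot, solPop, if_pos h, zero_add, solPop_add m ds 1]
      rw [ih m]
      have he : (1 + (solPop m ds 0).1).toNat = (solPop m ds 0).1.toNat + 1 := by omega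
      rw [he, List.replicate_succ]
      simp
    · have hgt : d > m := by omega
      simp [scanMax, hgt, solPop, h, relDays]

theorem relDays_gt (m : Int) (l : List Int) (hl : l = [] ∨ ∃ d' r, l = d' :: r ∧ m < d') :
    ∀ x ∈ relDays l, m < x := by
  rcases hl with h | ⟨d', r, h, hd⟩
  · subst h; simp [relDays]
  · subst h
    intro x hx
    simp only [relDays, List.mem_cons] at hx
    rcases hx with h | h
    · omega
    · have := scanMax_ge r d' x h; omega

-- dedup of a run of m (k ≥ 1 copies) followed by a list avoiding m
theorem foldl_add_repl (m : Int) : ∀ (k : Nat), 1 ≤ k →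
    (List.replicate k m).foldl PySem.Set.add PySem.Set.empty = [m] := by
  intro k
  induction k with
  | zero => omega
  | succ k ih =>
    intro _
    rcases Nat.eq_zero_or_pos k with hk | hk
    · subst hk; rfl
    · have aux : ∀ (j : Nat), (List.replicate j m).foldl PySem.Set.add [m] = [m] := by
        intro j; induction j with
        | zero => rfl
        | succ j ihj =>
          have : PySem.Set.add [m] m = [m] := by simp [PySem.Set.add, PySem.Set.contains]
          simp [List.replicate_succ, ihj]
      have : PySem.Set.add PySem.Set.empty m = [m] := rfl
      simp [List.replicate_succ, aux]

theorem foldl_add_cons (l : List Int) : ∀ (s : List Int) (m : Int), m ∉ l →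
    l.foldl PySem.Set.add (m :: s) = m :: l.foldl PySem.Set.add s := by
  induction l with
  | nil => intro s m _; rfl
  | cons y l ih =>
    intro s m hm
    have hym : ¬ (y = m) := fun h => hm (by simp [h])
    have hc : PySem.Set.contains (m :: s) y = PySem.Set.contains s y := by
      simp [PySem.Set.contains]
      exact fun hh => absurd hh hym
    have hstep : PySem.Set.add (m :: s) y = m :: PySem.Set.add s y := by
      simp only [PySem.Set.add, hc]
      split <;> simp
    rw [List.foldl_cons, hstep, List.foldl_cons, ih _ m (fun h => hm (List.mem_cons_of_mem _ h))]

theorem dedup_repl_append (m : Int) (k : Nat) (hk : 1 ≤ k) (l : List Int) (hm : m ∉ l) :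
    PySem.List.dedup (List.replicate k m ++ l) = m :: PySem.List.dedup l := by
  show (List.replicate k m ++ l).foldl PySem.Set.add PySem.Set.empty
      = m :: l.foldl PySem.Set.add PySem.Set.empty
  rw [List.foldl_append, foldl_add_repl m k hk]
  exact foldl_add_cons l [] m hm

-- grouping a queue by counting equal release days = A's pop loop
theorem group_eq_count : ∀ (n : Nat) (ds : List Int), ds.length ≤ n →
    (PySem.List.dedup (relDays ds)).map (fun x => ((relDays ds).count x : Int)) = solGroup ds := by
  intro n
  induction n with
  | zero =>
    intro ds h
    have : ds = [] := List.eq_nil_of_length_eq_zero (Nat.le_zero.mp h)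
    subst this; simp [relDays, PySem.List.dedup, PySem.Set.ofList]
  | succ n ih =>
    intro ds h
    cases ds with
    | nil => simp [relDays, PySem.List.dedup, PySem.Set.ofList]
    | cons m t =>
      have hrest := solPop_rest_head m t
      have hgt := relDays_gt m _ hrest
      have hm : m ∉ relDays (solPop m t 0).2 := fun hmem => absurd (hgt m hmem) (by omega)
      have hp := solPop_nonneg m t
      have hsplit : relDays (m :: t)
          = List.replicate ((solPop m t 0).1.toNat + 1) m ++ relDays (solPop m t 0).2 := by
        simp only [relDays, scan_split t m]
        rw [List.replicate_succ]
        simp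
      rw [hsplit, dedup_repl_append m _ (by omega) _ hm, List.map_cons]
      have hcnt : ((List.replicate ((solPop m t 0).1.toNat + 1) m ++ relDays (solPop m t 0).2).count m : Int)
          = (solPop m t 1).1 := by
        rw [List.count_append, List.count_replicate_self,
          List.count_eq_zero_of_not_mem hm, solPop_add m t 1]
        push_cast; omega
      have htail : (PySem.List.dedup (relDays (solPop m t 0).2)).map
            (fun x => ((List.replicate ((solPop m t 0).1.toNat + 1) m ++ relDays (solPop m t 0).2).count x : Int))
          = (PySem.List.dedup (relDays (solPop m t 0).2)).map
            (fun x => ((relDays (solPop m t 0).2).count x : Int)) := by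
        apply List.map_congr_left
        intro x hx
        have hxmem : x ∈ relDays (solPop m t 0).2 := (PySem.Set.mem_ofList _ _).mp hx
        have hxm : ¬ (x = m) := fun h => absurd (hgt x hxmem) (by omega)
        have h0 : List.count x (List.replicate ((solPop m t 0).1.toNat + 1) m) = 0 := by
          have hbx : (m == x) = false := beq_eq_false_iff_ne.mpr (fun hh => hxm hh.symm)
          simp [List.count_replicate, hbx]
        rw [List.count_append, h0]
        simp
      have hlen : (solPop m t 0).2.length ≤ n := by
        have := solPop_length_le m t 0
        have := Nat.succ_le_succ_iff.mp h
        omega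
      rw [htail, ih _ hlen, solGroup_cons, hcnt]
      congr 1
      rw [solPop_add m t 1]

-- ===== VERDICT (by name: the statement is the Claim_ definition above) =====
theorem solution_spec : Claim_equal_solution := by
  intro progresses speeds _ hpre
  unfold Spec_solution
  simp only [solution, solution_alt]
  rw [queue_eq_days progresses speeds hpre.1, foldB_rel]
  simp only [PySem.Dict.getD_counter]
  exact (group_eq_count _ _ le_rfl).symm
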